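-- pv_equiv track=rewrite | github.com/RyuMaster/forked-evm-testing | datacentre_api/modules/share_balances.py | get_position_names
-- ===== SOURCE A (Python) =====
-- POSITION_MAPPING = {
--     "GK": 1,
--     "LB": 2,
--     "CB": 4,
--     "RB": 8,
--     "DML": 16,
--     "DMC": 32,
--     "DMR": 64,
--     "LM": 128,
--     "CM": 256,
--     "RM": 512,
--     "AML": 1024,
--     "AMC": 2048,
--     "AMR": 4096,
--     "FL": 8192,
--     "FC": 16384,
--     "FR": 32768
-- }
--
-- def get_position_names(multi_position_value):
--     """Convert multi_position bitfield to list of position names"""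
--     if not multi_position_value:
--         return []
--     positions = []
--     for pos_name, pos_value in POSITION_MAPPING.items():
--         if multi_position_value & pos_value:
--             positions.append(pos_name)
--     return positions
-- ===== SOURCE B (Python) =====
-- POSITION_NAMES = ["GK", "LB", "CB", "RB", "DML", "DMC", "DMR", "LM",
--                   "CM", "RM", "AML", "AMC", "AMR", "FL", "FC", "FR"]
--
-- def get_position_names(multi_position_value):
--     """Convert multi_position bitfield to list of position names"""
--     if not multi_position_value:
--         return []
--     bits = format(multi_position_value & 0xFFFF, 'b')[::-1]
--     return [name for name, digit in zip(POSITION_NAMES, bits) if digit == '1']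
-- ===== Notes on version B (the rewrite author's own statement) =====
-- stated objective: alternative
-- what changed: A loops over the position dict testing each bit mask against the input and appending inside the loop; B is a staged loop-free pipeline: it renders the low sixteen bits of the input as a binary digit string via format(), reverses it, zips the digits with an index-ordered name table and keeps the names paired with a one digit.
import Mathlib
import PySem

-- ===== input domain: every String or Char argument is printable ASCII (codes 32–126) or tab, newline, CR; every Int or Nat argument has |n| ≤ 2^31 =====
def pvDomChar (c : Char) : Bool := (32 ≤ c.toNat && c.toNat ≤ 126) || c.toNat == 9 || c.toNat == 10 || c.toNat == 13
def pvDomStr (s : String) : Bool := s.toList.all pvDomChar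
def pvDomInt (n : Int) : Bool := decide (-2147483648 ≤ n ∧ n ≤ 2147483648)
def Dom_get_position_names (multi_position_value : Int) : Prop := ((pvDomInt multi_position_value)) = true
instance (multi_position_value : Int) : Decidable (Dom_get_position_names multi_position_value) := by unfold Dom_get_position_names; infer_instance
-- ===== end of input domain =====

-- B replaces A's mask-testing loop over the position dict by a staged pipeline: render the
-- 16-bit mask of the input as its binary digit string, zip the digits with a name table,
-- and keep the names paired with a '1' digit (objective: alternative decomposition).

-- ===== PORT A =====
def POSITION_MAPPING : List (String × Int) :=
  [("GK", 1), ("LB", 2), ("CB", 4), ("RB", 8), ("DML", 16), ("DMC", 32), ("DMR", 64),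
   ("LM", 128), ("CM", 256), ("RM", 512), ("AML", 1024), ("AMC", 2048), ("AMR", 4096),
   ("FL", 8192), ("FC", 16384), ("FR", 32768)]

def get_position_names (multi_position_value : Int) : List String :=
  if multi_position_value == 0 then []       -- "if not multi_position_value"
  else POSITION_MAPPING.foldl
    (fun positions p =>
      if PySem.Int.band multi_position_value p.2 != 0 then positions ++ [p.1] else positions) []

-- ===== PORT B =====
def POSITION_NAMES : List String :=
  ["GK", "LB", "CB", "RB", "DML", "DMC", "DMR", "LM",
   "CM", "RM", "AML", "AMC", "AMR", "FL", "FC", "FR"]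

-- binary digits of v, least significant first; empty for 0.
-- format(v, 'b')[::-1] = pyBinRev v for v > 0, and ['0'] for v = 0 (handled at the call site).
def pyBinRev (v : Nat) : List Char :=
  if _h : v = 0 then []
  else (if v % 2 = 1 then '1' else '0') :: pyBinRev (v / 2)
termination_by v
decreasing_by exact Nat.div_lt_self (by omega) (by omega)

def get_position_names_alt (multi_position_value : Int) : List String :=
  if multi_position_value == 0 then []
  else
    -- bits = format(multi_position_value & 0xFFFF, 'b')[::-1]
    let m := (PySem.Int.band multi_position_value 65535).toNat
    let bits := if m = 0 then ['0'] else pyBinRev m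
    -- [name for name, digit in zip(POSITION_NAMES, bits) if digit == '1']
    ((POSITION_NAMES.zip bits).filter (fun p => p.2 == '1')).map (fun p => p.1)

-- ===== PRECONDITION & SPEC =====
def Spec_get_position_names (multi_position_value : Int) (out : List String) : Prop := out = get_position_names_alt multi_position_value
instance (multi_position_value : Int) (out : List String) : Decidable (Spec_get_position_names multi_position_value out) := by unfold Spec_get_position_names; infer_instance

-- ===== CLAIM (what is proved, stated in full; the proofs are below) =====
def Claim_equal_get_position_names : Prop := ∀ (multi_position_value : Int), Dom_get_position_names multi_position_value → Spec_get_position_names multi_position_value (get_position_names multi_position_value)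

-- ===== LEMMAS AND PROOFS =====

-- reference form: scan bits i, i+1, …, i+f-1 of m, emitting the name of each set bit
def chainB : Nat → Nat → Nat → List String
  | 0, _, _ => []
  | f + 1, i, m =>
      (if m.testBit i then [POSITION_NAMES.getD i ""] else []) ++ chainB f (i + 1) m

-- B-side reference: consume names left to right while halving the value
def consumeB : List String → Nat → List String
  | [], _ => []
  | x :: L, v => (if v % 2 = 1 then [x] else []) ++ consumeB L (v / 2)

lemma consumeB_zero : ∀ (L : List String), consumeB L 0 = [] := by
  intro L
  induction L with
  | nil => rfl
  | cons x L ih => simp [consumeB, ih]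

lemma zip_binRev (L : List String) :
    ∀ v : Nat, ((L.zip (pyBinRev v)).filter (fun p => p.2 == '1')).map (fun p => p.1)
      = consumeB L v := by
  induction L with
  | nil => intro v; simp [consumeB]
  | cons x L ih =>
      intro v
      by_cases h0 : v = 0
      · subst h0
        rw [pyBinRev, dif_pos rfl, consumeB_zero]
        simp
      · rw [pyBinRev, dif_neg h0]
        by_cases hp : v % 2 = 1
        · simp [consumeB, hp, ih]
        · simp [consumeB, hp, ih]

lemma zip_zero_digit (L : List String) :
    ((L.zip ['0']).filter (fun p => p.2 == '1')).map (fun p => p.1) = [] := by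
  cases L <;> simp

-- B's pipeline equals consumeB on the name table, for every mask value
lemma alt_consume (m : Nat) :
    ((POSITION_NAMES.zip (if m = 0 then ['0'] else pyBinRev m)).filter
        (fun p => p.2 == '1')).map (fun p => p.1) = consumeB POSITION_NAMES m := by
  by_cases h0 : m = 0
  · subst h0
    simp [zip_zero_digit, consumeB_zero]
  · rw [if_neg h0, zip_binRev]

lemma tb_div (i : Nat) : ∀ m : Nat, Nat.testBit m i = decide (m / 2 ^ i % 2 = 1) := by
  induction i with
  | zero => intro m; simp [Nat.testBit_zero]
  | succ i ih =>
      intro m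
      rw [Nat.testBit_add_one, ih, Nat.div_div_eq_div_mul, ← pow_succ']

-- consumeB on the 16 literal names is the 16-bit test chain
lemma consume16 (m : Nat) : consumeB POSITION_NAMES m = chainB 16 0 m := by
  simp only [POSITION_NAMES, consumeB, chainB, tb_div, List.getD]
  norm_num [Nat.div_div_eq_div_mul]

lemma fold_shape (p : String × Int → Bool) :
    ∀ (l : List (String × Int)) (acc : List String),
      l.foldl (fun a x => if p x then a ++ [x.1] else a) acc
        = acc ++ l.foldr (fun x r => (if p x then [x.1] else []) ++ r) [] := by
  intro l
  induction l with
  | nil => intro acc; simp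
  | cons x xs ih =>
      intro acc
      by_cases hp : p x <;> simp [List.foldl_cons, List.foldr_cons, hp, ih]

-- A's test `n & 2^i != 0` reads bit i of the 16-bit mask of n (i < 16)
lemma key (n : Int) (i : Nat) (v : Int) (hv : v = 2 ^ i) (hi : i < 16) :
    (PySem.Int.band n v != 0) = ((PySem.Int.band n 65535).toNat).testBit i := by
  subst hv
  have hcast : ((2 : Int) ^ i) = ((2 ^ i : Nat) : Int) := by push_cast; ring
  by_cases hn : 0 ≤ n
  · rw [hcast, PySem.Int.band_of_nonneg hn (by positivity),
      PySem.Int.band_of_nonneg hn (by norm_num)]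
    have h65 : (65535 : Int).toNat = 2 ^ 16 - 1 := by decide
    simp only [Int.toNat_natCast, h65]
    rw [Nat.testBit_and, Nat.testBit_two_pow_sub_one]
    rw [Nat.and_two_pow]
    cases n.toNat.testBit i <;> simp [hi]
  · have hk : (0 : Int) ≤ 65535 := by norm_num
    have hb2 : (0 : Int) ≤ (2 : Int) ^ i := by positivity
    simp only [PySem.Int.band, if_neg hn, if_pos hb2, if_pos hk]
    have hpt : ((2 : Int) ^ i).toNat = 2 ^ i := by rw [hcast, Int.toNat_natCast]
    have h65 : (65535 : Int).toNat = 65535 := by decide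
    rw [hpt, h65]
    have hmod : (65535 : Nat) &&& (-n - 1).toNat = (-n - 1).toNat % 65536 := by
      rw [Nat.and_comm]
      rw [show (65535 : Nat) = 2 ^ 16 - 1 by norm_num, Nat.and_two_pow_sub_one_eq_mod]
    rw [hmod]
    have hklt : (-n - 1).toNat % 65536 < 2 ^ 16 := by
      have := Nat.mod_lt (-n - 1).toNat (show 0 < 65536 by norm_num)
      omega
    have hrhs : ((65535 - (-n - 1).toNat % 65536 : Nat) : Int).toNat.testBit i
        = !(-n - 1).toNat.testBit i := by
      have hval : (65535 - (-n - 1).toNat % 65536 : Nat)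
          = 2 ^ 16 - ((-n - 1).toNat % 65536 + 1) := by omega
      rw [Int.toNat_natCast, hval, Nat.testBit_two_pow_sub_succ hklt]
      have hmb : ((-n - 1).toNat % 65536).testBit i = (-n - 1).toNat.testBit i := by
        rw [show (65536 : Nat) = 2 ^ 16 by norm_num, Nat.testBit_mod_two_pow]
        simp [hi]
      rw [hmb]
      simp [hi]
    rw [hrhs]
    rw [show (2 ^ i : Nat) &&& (-n - 1).toNat = ((-n - 1).toNat.testBit i).toNat * 2 ^ i by
      rw [Nat.and_comm, Nat.and_two_pow]]
    cases (-n - 1).toNat.testBit i <;> simp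

-- ===== VERDICT (by name: the statement is the Claim_ definition above) =====
theorem get_position_names_spec : Claim_equal_get_position_names := by
  intro n _
  unfold Spec_get_position_names
  by_cases hn : n = 0
  · subst hn; rfl
  · have hb : (n == 0) = false := by simpa using hn
    have h0 := key n 0 1 (by norm_num) (by norm_num)
    have h1 := key n 1 2 (by norm_num) (by norm_num)
    have h2 := key n 2 4 (by norm_num) (by norm_num)
    have h3 := key n 3 8 (by norm_num) (by norm_num)
    have h4 := key n 4 16 (by norm_num) (by norm_num)
    have h5 := key n 5 32 (by norm_num) (by norm_num)
    have h6 := key n 6 64 (by norm_num) (by norm_num)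
    have h7 := key n 7 128 (by norm_num) (by norm_num)
    have h8 := key n 8 256 (by norm_num) (by norm_num)
    have h9 := key n 9 512 (by norm_num) (by norm_num)
    have h10 := key n 10 1024 (by norm_num) (by norm_num)
    have h11 := key n 11 2048 (by norm_num) (by norm_num)
    have h12 := key n 12 4096 (by norm_num) (by norm_num)
    have h13 := key n 13 8192 (by norm_num) (by norm_num)
    have h14 := key n 14 16384 (by norm_num) (by norm_num)
    have h15 := key n 15 32768 (by norm_num) (by norm_num)
    simp only [get_position_names, get_position_names_alt, hb, Bool.false_eq_true, if_false,
      alt_consume, consume16]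
    rw [fold_shape]
    simp only [POSITION_MAPPING, List.foldr_cons, List.foldr_nil, List.nil_append]
    simp only [h0, h1, h2, h3, h4, h5, h6, h7, h8, h9, h10, h11, h12, h13, h14, h15]
    simp [chainB, POSITION_NAMES]
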